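-- pv_equiv track=rewrite | github.com/ewindisch/pydance | util.py | find_subtitle
-- ===== SOURCE A (Python) =====
-- def find_subtitle(title):
--   for pair in (("[", "]"), ("(", ")"), ("~", "~"), ("-", "-")):
--     if pair[0] in title and title[-1] == pair[1]:
--       l = title[0:-1].rindex(pair[0])
--       if l != 0:
--         subtitle = title[l:]
--         title = title[:l]
--         return title, subtitle
--   else: return title, ""
-- ===== SOURCE B (Python) =====
-- def find_subtitle(title):
--     # one forward pass indexes the last occurrence of every opener character;
--     # then a constant-time dispatch on the final character picks the split point
--     last = {"[": 0, "(": 0, "~": 0, "-": 0}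
--     for i, ch in enumerate(title[:-1]):
--         if ch in last:
--             last[ch] = i
--     opener_of = {"]": "[", ")": "(", "~": "~", "-": "-"}
--     if title and title[-1] in opener_of:
--         l = last[opener_of[title[-1]]]
--         if l:
--             return title[:l], title[l:]
--     return title, ""
-- ===== Notes on version B (the rewrite author's own statement) =====
-- stated objective: alternative
-- what changed: A loops over the four delimiter pairs and, on a match, scans backwards with rindex; B never searches backwards at all: one forward pass over title[:-1] builds a last-occurrence index for all four opener characters at once, and the final character then selects the split point from that table in O(1).
-- crash fix: A raises ValueError when the title's terminal character is a tilde or hyphen occurring nowhere else in the title (rindex on title[:-1] fails); B returns the title unchanged with an empty subtitle there. — e.g. on find_subtitle("ab~"): A raises ValueError, B returns ("ab~", "")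
import Mathlib
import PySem

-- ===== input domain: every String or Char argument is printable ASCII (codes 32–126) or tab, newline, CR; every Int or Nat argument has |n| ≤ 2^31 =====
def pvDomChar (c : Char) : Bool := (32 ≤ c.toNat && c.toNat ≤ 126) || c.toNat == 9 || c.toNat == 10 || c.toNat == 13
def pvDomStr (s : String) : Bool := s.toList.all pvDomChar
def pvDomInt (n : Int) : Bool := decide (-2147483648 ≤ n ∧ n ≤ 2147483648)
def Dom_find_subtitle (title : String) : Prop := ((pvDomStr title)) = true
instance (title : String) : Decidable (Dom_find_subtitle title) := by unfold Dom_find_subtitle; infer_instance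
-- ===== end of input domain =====

-- B replaces A's loop over the four pairs (each with a backward rindex scan) by ONE forward
-- pass that records the last occurrence of every opener character in a table, then an O(1)
-- dispatch on the final character; return values only, no mutation.

-- ===== PORT A =====
-- transliteration of Python's str.rindex for a single-character needle:
-- highest index of c in cs, none = ValueError
def rindexAux (cs : List Char) (c : Char) (i : Nat) (acc : Option Nat) : Option Nat :=
  match cs with
  | [] => acc
  | x :: t => rindexAux t c (i + 1) (if x = c then some i else acc)

-- literal port of A's for-loop over the four pairs; `title[0:-1]` = dropLast, `title[:l]`/`title[l:]` = take/drop.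
-- On the `rindex` ValueError (none case) Python raises; those inputs are excluded by Pre_ and the port returns (title, "").
def loopA : List (Char × Char) → List Char → String → String × String
  | [], _, title => (title, "")
  | p :: rest, cs, title =>
    if p.1 ∈ cs ∧ cs.getLast? = some p.2 then
      match rindexAux cs.dropLast p.1 0 none with
      | some l => if l ≠ 0 then (String.ofList (cs.take l), String.ofList (cs.drop l)) else loopA rest cs title
      | none => (title, "")   -- ValueError in Python; outside Pre_
    else loopA rest cs title

def find_subtitle (title : String) : String × String :=
  loopA [('[', ']'), ('(', ')'), ('~', '~'), ('-', '-')] title.toList title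

-- ===== PORT B =====
-- the loop body `if ch in last: last[ch] = i`
def stepB (d : PySem.Dict Char Int) (p : Int × Char) : PySem.Dict Char Int :=
  if d.contains p.2 then d.insert p.2 p.1 else d

def find_subtitle_alt (title : String) : String × String :=
  let cs := title.toList
  -- `for i, ch in enumerate(title[:-1]): if ch in last: last[ch] = i`
  let last := (PySem.List.enumerate cs.dropLast 0).foldl stepB
      (PySem.Dict.ofList [('[', 0), ('(', 0), ('~', 0), ('-', 0)])
  let opener_of : PySem.Dict Char Char :=
      PySem.Dict.ofList [(']', '['), (')', '('), ('~', '~'), ('-', '-')]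
  match cs.getLast? with                    -- `if title and title[-1] in opener_of`
  | some c =>
    match opener_of.get? c with
    | some o =>
      let l : Int := last.getD o 0          -- `l = last[opener_of[title[-1]]]`
      if l ≠ 0 then (String.ofList (cs.take l.toNat), String.ofList (cs.drop l.toNat))
      else (title, "")
    | none => (title, "")
  | none => (title, "")

-- ===== PRECONDITION & SPEC =====
-- Pre_ excludes exactly the inputs where A raises ValueError: a title whose last character is a
-- tilde or hyphen that is its sole occurrence (rindex on title[:-1] fails there).
def Pre_find_subtitle (title : String) : Prop :=
  (title.toList.getLast? = some '~' → '~' ∈ title.toList.dropLast) ∧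
  (title.toList.getLast? = some '-' → '-' ∈ title.toList.dropLast)
instance (title : String) : Decidable (Pre_find_subtitle title) := by
  unfold Pre_find_subtitle; infer_instance

def pvWitness_find_subtitle : String := "ab [cd]"

-- A raises ValueError on titles whose last character is a tilde or hyphen occurring nowhere else; B returns the title with an empty subtitle.
def Raises_find_subtitle (title : String) : Prop :=
  (title.toList.getLast? = some '~' ∧ '~' ∉ title.toList.dropLast) ∨
  (title.toList.getLast? = some '-' ∧ '-' ∉ title.toList.dropLast)
instance (title : String) : Decidable (Raises_find_subtitle title) := by
  unfold Raises_find_subtitle; infer_instance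
def pvRaiseWitness_find_subtitle : String := "ab~"
def pvRaiseWitnessOut_find_subtitle : String × String := ("ab~", "")

def Spec_find_subtitle (title : String) (out : String × String) : Prop := out = find_subtitle_alt title
instance (title : String) (out : String × String) : Decidable (Spec_find_subtitle title out) := by unfold Spec_find_subtitle; infer_instance

-- ===== CLAIM (what is proved, stated in full; the proofs are below) =====
def Claim_equal_find_subtitle : Prop := ∀ (title : String), Dom_find_subtitle title → Pre_find_subtitle title → Spec_find_subtitle title (find_subtitle title)
def Claim_raises_find_subtitle : Prop := (∀ (title : String), Dom_find_subtitle title → Raises_find_subtitle title → ¬ Pre_find_subtitle title) ∧ (Dom_find_subtitle (pvRaiseWitness_find_subtitle) ∧ Raises_find_subtitle (pvRaiseWitness_find_subtitle) ∧ find_subtitle_alt (pvRaiseWitness_find_subtitle) = pvRaiseWitnessOut_find_subtitle)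

-- ===== LEMMAS AND PROOFS =====

-- structural "last index of c in cs" used only by the proofs, as the bridge between
-- A's backward rindex and B's forward table-building fold
def lastIdx : List Char → Char → Option Nat
  | [], _ => none
  | x :: t, o =>
    match lastIdx t o with
    | some l => some (l + 1)
    | none => if x = o then some 0 else none

theorem rindexAux_eq_lastIdx (cs : List Char) (c : Char) (i : Nat) (acc : Option Nat) :
    rindexAux cs c i acc = match lastIdx cs c with
      | some l => some (i + l)
      | none => acc := by
  induction cs generalizing i acc with
  | nil => simp [rindexAux, lastIdx]
  | cons x t ih =>
    rw [rindexAux, ih]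
    rcases h : lastIdx t c with _ | l
    · by_cases hx : x = c <;> simp [lastIdx, h, hx]
    · simp only [lastIdx, h]
      congr 1
      omega

theorem lastIdx_eq_none_iff (cs : List Char) (c : Char) :
    lastIdx cs c = none ↔ c ∉ cs := by
  induction cs with
  | nil => simp [lastIdx]
  | cons x t ih =>
    rcases h : lastIdx t c with _ | l
    · have ht : c ∉ t := ih.mp h
      by_cases hx : x = c
      · subst hx; simp [lastIdx, h]
      · simp [lastIdx, h, hx, ht, Ne.symm hx]
    · have ht : c ∈ t := by
        by_contra hc
        rw [ih.mpr hc] at h; cases h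
      simp [lastIdx, h, ht]

theorem foldl_stepB_getD (cs : List Char) (o : Char) :
    ∀ (s : Int) (d : PySem.Dict Char Int), d.contains o = true →
    ((PySem.List.enumerate cs s).foldl stepB d).getD o 0 =
      match lastIdx cs o with
      | some l => s + l
      | none => d.getD o 0 := by
  induction cs with
  | nil => intro s d _; simp [PySem.List.enumerate_nil, lastIdx]
  | cons x t ih =>
    intro s d hd
    rw [PySem.List.enumerate_cons, List.foldl_cons]
    have hd' : (stepB d (s, x)).contains o = true := by
      unfold stepB
      split
      · rw [PySem.Dict.contains_insert]; simp [hd]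
      · exact hd
    rw [ih (s + 1) _ hd']
    rcases h : lastIdx t o with _ | l
    · by_cases hx : x = o
      · subst hx
        have : stepB d (s, x) = d.insert x s := by simp [stepB, hd]
        simp [lastIdx, h, this, PySem.Dict.getD_insert_self]
      · have hgd : (stepB d (s, x)).getD o 0 = d.getD o 0 := by
          unfold stepB
          split
          · rw [PySem.Dict.getD_insert]
            exact if_neg (fun e => hx e.symm)
          · rfl
        simp [lastIdx, h, hx, hgd]
    · simp only [lastIdx, h]
      push_cast
      ring_nf

theorem getD_table (ds : List Char) (o : Char)
    (ho : o = '[' ∨ o = '(' ∨ o = '~' ∨ o = '-') :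
    ((PySem.List.enumerate ds 0).foldl stepB
        (PySem.Dict.ofList [('[', 0), ('(', 0), ('~', 0), ('-', 0)])).getD o 0 =
      match lastIdx ds o with
      | some l => (l : Int)
      | none => 0 := by
  have hc : (PySem.Dict.ofList [('[', (0:Int)), ('(', 0), ('~', 0), ('-', 0)]).contains o = true := by
    rcases ho with h | h | h | h <;> subst h <;> decide
  have h0 : (PySem.Dict.ofList [('[', (0:Int)), ('(', 0), ('~', 0), ('-', 0)]).getD o 0 = 0 := by
    rcases ho with h | h | h | h <;> subst h <;> decide
  rw [foldl_stepB_getD ds o 0 _ hc]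
  rcases h : lastIdx ds o with _ | l <;> simp [h0]

-- unfold one B-side branch: B splits at lastIdx when present and nonzero
theorem altB_case (title : String) (ds : List Char) (c o : Char)
    (hcs : title.toList = ds ++ [c])
    (hco : (PySem.Dict.ofList [(']', '['), (')', '('), ('~', '~'), ('-', '-')]).get? c = some o)
    (ho : o = '[' ∨ o = '(' ∨ o = '~' ∨ o = '-') :
    find_subtitle_alt title =
      match lastIdx ds o with
      | some l => if l ≠ 0 then (String.ofList ((ds ++ [c]).take l), String.ofList ((ds ++ [c]).drop l)) else (title, "")
      | none => (title, "") := by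
  unfold find_subtitle_alt
  simp only [hcs, List.getLast?_concat, List.dropLast_concat, hco]
  rw [getD_table ds o ho]
  rcases h : lastIdx ds o with _ | l
  · rfl
  · by_cases hl : l = 0
    · simp [hl]
    · have : ((l : Int) ≠ 0) := by exact_mod_cast hl
      simp [hl]

theorem main_eq (title : String) (hpre : Pre_find_subtitle title) :
    find_subtitle title = find_subtitle_alt title := by
  rcases List.eq_nil_or_concat title.toList with h | ⟨ds, c, h⟩
  · simp [find_subtitle, find_subtitle_alt, loopA, h]
  · unfold Pre_find_subtitle at hpre
    simp only [h, List.concat_eq_append, List.getLast?_concat, List.dropLast_concat, Option.some.injEq] at hpre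
    rw [List.concat_eq_append] at h
    have hA : find_subtitle title =
        loopA [('[', ']'), ('(', ')'), ('~', '~'), ('-', '-')] (ds ++ [c]) title := by
      rw [find_subtitle, h]
    by_cases h1 : c = ']'
    · subst h1
      rw [hA, altB_case title ds ']' '[' h (by decide) (by decide)]
      by_cases hm : '[' ∈ ds
      · rcases hl : lastIdx ds '[' with _ | l
        · exact absurd ((lastIdx_eq_none_iff ds '[').mp hl) (by simpa using hm)
        · have hri : rindexAux ds '[' 0 none = some l := by
            rw [rindexAux_eq_lastIdx, hl]; simp
          by_cases hl0 : l = 0 <;> simp [loopA, hm, hri, hl0]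
      · have hn : lastIdx ds '[' = none := (lastIdx_eq_none_iff ds '[').mpr hm
        have : '[' ∉ ds ++ [']'] := by simp [hm]
        simp [loopA, this, hn]
    · by_cases h2 : c = ')'
      · subst h2
        rw [hA, altB_case title ds ')' '(' h (by decide) (by decide)]
        by_cases hm : '(' ∈ ds
        · rcases hl : lastIdx ds '(' with _ | l
          · exact absurd ((lastIdx_eq_none_iff ds '(').mp hl) (by simpa using hm)
          · have hri : rindexAux ds '(' 0 none = some l := by
              rw [rindexAux_eq_lastIdx, hl]; simp
            by_cases hl0 : l = 0 <;> simp [loopA, hm, hri, hl0]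
        · have hn : lastIdx ds '(' = none := (lastIdx_eq_none_iff ds '(').mpr hm
          have : '(' ∉ ds ++ [')'] := by simp [hm]
          simp [loopA, this, hn]
      · by_cases h3 : c = '~'
        · subst h3
          rw [hA, altB_case title ds '~' '~' h (by decide) (by decide)]
          have hm : '~' ∈ ds := hpre.1 rfl
          rcases hl : lastIdx ds '~' with _ | l
          · exact absurd ((lastIdx_eq_none_iff ds '~').mp hl) (by simpa using hm)
          · have hri : rindexAux ds '~' 0 none = some l := by
              rw [rindexAux_eq_lastIdx, hl]; simp
            by_cases hl0 : l = 0 <;> simp [loopA, hm, hri, hl0]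
        · by_cases h4 : c = '-'
          · subst h4
            rw [hA, altB_case title ds '-' '-' h (by decide) (by decide)]
            have hm : '-' ∈ ds := hpre.2 rfl
            rcases hl : lastIdx ds '-' with _ | l
            · exact absurd ((lastIdx_eq_none_iff ds '-').mp hl) (by simpa using hm)
            · have hri : rindexAux ds '-' 0 none = some l := by
                rw [rindexAux_eq_lastIdx, hl]; simp
              by_cases hl0 : l = 0 <;> simp [loopA, hm, hri, hl0]
          · have e1 : (']' == c) = false := by simp [Ne.symm h1]
            have e2 : ((')' : Char) == c) = false := by simp [Ne.symm h2]
            have e3 : (('~' : Char) == c) = false := by simp [Ne.symm h3]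
            have e4 : (('-' : Char) == c) = false := by simp [Ne.symm h4]
            rw [hA]
            unfold find_subtitle_alt
            have hitems : (PySem.Dict.ofList [(']', '['), (')', '('), ('~', '~'), ('-', '-')] : PySem.Dict Char Char).items = [(']', '['), (')', '('), ('~', '~'), ('-', '-')] := by decide
            simp [h, loopA, PySem.Dict.get?, hitems, List.find?, e1, e2, e3, e4, h1, h2, h3, h4]

-- ===== VERDICT (by name: the statement is the Claim_ definition above) =====
theorem find_subtitle_spec : Claim_equal_find_subtitle := by
  intro title _ hpre; exact main_eq title hpre

-- find_subtitle_raises: A's ValueError inputs lie outside Pre_find_subtitle, and B's port returns (title, "") at the witness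
theorem find_subtitle_raises : Claim_raises_find_subtitle := by
  unfold Claim_raises_find_subtitle
  constructor
  · intro title _ hr hp
    rcases hr with ⟨h1, h2⟩ | ⟨h1, h2⟩
    · exact h2 (hp.1 h1)
    · exact h2 (hp.2 h1)
  · exact ⟨by decide, by decide, by decide⟩

-- self-check: the crash-fix witness value above is exactly what B's port returns (projection of find_subtitle_raises)
theorem pvRaises_witness_ok : find_subtitle_alt pvRaiseWitness_find_subtitle = pvRaiseWitnessOut_find_subtitle :=
  find_subtitle_raises.2.2.2
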